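-- pv_equiv track=rewrite | github.com/SanjeevaRDodlapati/QeMLflow | tools/linting/return_fix.py | _is_inside_function
-- ===== SOURCE A (Python) =====
-- from typing import List, Tuple
--
-- def _is_inside_function(lines: List[str], line_idx: int) -> bool:
--     """Check if the given line is inside a function."""
--     # Look backwards for function definition
--     current_indent = len(lines[line_idx]) - len(lines[line_idx].lstrip())
--
--     for i in range(line_idx - 1, -1, -1):
--         line = lines[i].strip()
--         if line.startswith('def ') and line.endswith(':'):
--             # Found a function, check if we're properly indented within it
--             func_indent = len(lines[i]) - len(lines[i].lstrip())
--
--             # Check if we're inside the function body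
--             if current_indent > func_indent:
--                 # Also verify we haven't hit another def at the same or higher level
--                 for j in range(i + 1, line_idx):
--                     check_line = lines[j].strip()
--                     if check_line.startswith('def ') and check_line.endswith(':'):
--                         check_indent = len(lines[j]) - len(lines[j].lstrip())
--                         if check_indent <= func_indent:
--                             return False  # Hit another function at same level
--                 return True
--             else:
--                 return False
--         elif line.startswith('class ') and line.endswith(':'):
--             # Hit a class, not inside a function
--             return False
--     return False
-- ===== SOURCE B (Python) =====
-- from typing import List
--
-- def _is_inside_function(lines: List[str], line_idx: int) -> bool:
--     """Check if the given line is inside a function (single forward pass)."""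
--     last = None  # (is_def, indent) of the last def/class header seen before line_idx
--     for i in range(line_idx):
--         s = lines[i].strip()
--         if (s.startswith('def ') or s.startswith('class ')) and s.endswith(':'):
--             last = (s.startswith('def '), len(lines[i]) - len(lines[i].lstrip()))
--     if last is None or not last[0]:
--         return False
--     current_indent = len(lines[line_idx]) - len(lines[line_idx].lstrip())
--     return current_indent > last[1]
-- ===== Notes on version B (the rewrite author's own statement) =====
-- stated objective: simpler
-- what changed: Replaces A's backward scan with its nested inner verification loop by a single forward pass that keeps only the last def/class header seen before line_idx, then decides from that header's kind and indent.
import Mathlib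
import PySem

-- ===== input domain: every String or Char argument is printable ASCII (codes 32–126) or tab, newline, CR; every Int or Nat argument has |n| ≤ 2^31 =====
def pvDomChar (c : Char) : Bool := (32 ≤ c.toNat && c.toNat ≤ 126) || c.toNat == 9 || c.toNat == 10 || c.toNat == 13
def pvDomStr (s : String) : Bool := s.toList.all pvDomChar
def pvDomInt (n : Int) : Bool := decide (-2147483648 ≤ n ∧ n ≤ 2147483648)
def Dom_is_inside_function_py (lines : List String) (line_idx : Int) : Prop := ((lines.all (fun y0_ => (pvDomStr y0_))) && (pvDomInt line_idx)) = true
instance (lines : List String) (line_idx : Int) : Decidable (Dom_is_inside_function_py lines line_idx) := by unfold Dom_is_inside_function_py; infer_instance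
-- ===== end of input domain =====

-- B replaces A's backward scan (with its dead inner verification loop) by a single
-- forward pass keeping the last def/class header seen before line_idx (objective: simpler).

-- ===== PORT A =====
-- shared helper: len(s) - len(s.lstrip())
def pvIndent (s : String) : Int := (PySem.Str.len s : Int) - (PySem.Str.len (PySem.Str.lstrip s) : Int)

-- inner loop 'for j in range(i + 1, line_idx): …'
def pvAInner (lines : List String) (func_indent : Int) : List Int → Bool
  | [] => true
  | j :: rest =>
    let raw := (PySem.List.pyGet? lines j).getD ""   -- lines[j] (in range under Pre_)
    let check_line := PySem.Str.strip raw
    if PySem.Str.startswith check_line "def " && PySem.Str.endswith check_line ":" then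
      if pvIndent raw ≤ func_indent then false
      else pvAInner lines func_indent rest
    else pvAInner lines func_indent rest

-- outer loop 'for i in range(line_idx - 1, -1, -1): …'
def pvAOuter (lines : List String) (line_idx current_indent : Int) : List Int → Bool
  | [] => false
  | i :: rest =>
    let raw := (PySem.List.pyGet? lines i).getD ""   -- lines[i] (in range under Pre_)
    let line := PySem.Str.strip raw
    if PySem.Str.startswith line "def " && PySem.Str.endswith line ":" then
      let func_indent := pvIndent raw
      if current_indent > func_indent then
        pvAInner lines func_indent (PySem.List.pyRange (i + 1) line_idx 1)
      else false
    else if PySem.Str.startswith line "class " && PySem.Str.endswith line ":" then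
      false
    else pvAOuter lines line_idx current_indent rest

def is_inside_function_py (lines : List String) (line_idx : Int) : Bool :=
  let current_indent := pvIndent ((PySem.List.pyGet? lines line_idx).getD "")  -- lines[line_idx] (Pre_)
  pvAOuter lines line_idx current_indent (PySem.List.pyRange (line_idx - 1) (-1) (-1))

-- ===== PORT B =====
-- one step of B's forward pass: overwrite the record with the header at lines[i], if any
def pvBStep (lines : List String) (acc : Option (Bool × Int)) (i : Int) : Option (Bool × Int) :=
  let raw := (PySem.List.pyGet? lines i).getD ""     -- lines[i] (in range under Pre_)
  let s := PySem.Str.strip raw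
  if (PySem.Str.startswith s "def " || PySem.Str.startswith s "class ") && PySem.Str.endswith s ":" then
    some (PySem.Str.startswith s "def ", pvIndent raw)
  else acc

def is_inside_function_py_alt (lines : List String) (line_idx : Int) : Bool :=
  let last := (PySem.List.pyRange 0 line_idx 1).foldl (pvBStep lines) none
  match last with
  | some (true, fi) => decide (pvIndent ((PySem.List.pyGet? lines line_idx).getD "") > fi)
  | _ => false

-- ===== PRECONDITION & SPEC =====
-- A evaluates lines[line_idx]; Pre_ excludes exactly the IndexError inputs (|line_idx| out of range).
def Pre_is_inside_function_py (lines : List String) (line_idx : Int) : Prop :=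
  PySem.Raise.InRange lines.length line_idx
instance (lines : List String) (line_idx : Int) : Decidable (Pre_is_inside_function_py lines line_idx) := by unfold Pre_is_inside_function_py; infer_instance

def pvWitness_is_inside_function_py : List String × Int := (["def f():", "    return 1"], 1)

def Spec_is_inside_function_py (lines : List String) (line_idx : Int) (out : Bool) : Prop := out = is_inside_function_py_alt lines line_idx
instance (lines : List String) (line_idx : Int) (out : Bool) : Decidable (Spec_is_inside_function_py lines line_idx out) := by unfold Spec_is_inside_function_py; infer_instance

-- ===== CLAIM (what is proved, stated in full; the proofs are below) =====
def Claim_equal_is_inside_function_py : Prop := ∀ (lines : List String) (line_idx : Int), Dom_is_inside_function_py lines line_idx → Pre_is_inside_function_py lines line_idx → Spec_is_inside_function_py lines line_idx (is_inside_function_py lines line_idx)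

-- ===== LEMMAS AND PROOFS =====

-- header record of line i, as B's step computes it
def pvHdr (lines : List String) (i : Int) : Option (Bool × Int) :=
  let raw := (PySem.List.pyGet? lines i).getD ""
  let s := PySem.Str.strip raw
  if (PySem.Str.startswith s "def " || PySem.Str.startswith s "class ") && PySem.Str.endswith s ":" then
    some (PySem.Str.startswith s "def ", pvIndent raw)
  else none

-- "line i is a def-header"
def pvIsDef (lines : List String) (i : Int) : Bool :=
  let s := PySem.Str.strip ((PySem.List.pyGet? lines i).getD "")
  PySem.Str.startswith s "def " && PySem.Str.endswith s ":"

def pvInterp (ci : Int) : Option (Bool × Int) → Bool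
  | some (true, fi) => decide (ci > fi)
  | _ => false

lemma pvAInner_true (lines : List String) (fi : Int) (js : List Int)
    (h : ∀ j ∈ js, pvIsDef lines j = false) : pvAInner lines fi js = true := by
  induction js with
  | nil => rfl
  | cons j rest ih =>
    have hj := h j (by simp)
    simp only [pvIsDef] at hj
    simp only [pvAInner, hj, if_false, Bool.false_eq_true]
    exact ih (fun x hx => h x (by simp [hx]))

lemma pvHdr_none_not_def (lines : List String) (j : Int) (h : pvHdr lines j = none) :
    pvIsDef lines j = false := by
  simp only [pvHdr] at h
  simp only [pvIsDef]
  simp at h ⊢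
  intro hdt
  exact h (Or.inl hdt)

-- the key bridge: A's backward scan over [k-1 … 0] equals B's forward fold over [0 … k-1],
-- provided every line in [k, line_idx) carries no header (then A's inner verification loop returns True).
lemma pvMain (lines : List String) (line_idx ci : Int) (k : Nat)
    (hk : (k : Int) ≤ line_idx)
    (hclean : ∀ j, (k : Int) ≤ j → j < line_idx → pvHdr lines j = none) :
    pvAOuter lines line_idx ci (PySem.List.pyRange ((k : Int) - 1) (-1) (-1)) =
      pvInterp ci ((PySem.List.pyRange 0 (k : Int) 1).foldl (pvBStep lines) none) := by
  induction k with
  | zero =>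
    rw [PySem.List.pyRange_neg_one_eq_nil (by omega), PySem.List.pyRange_one_eq_nil (by omega)]
    rfl
  | succ m ih =>
    rw [show ((m + 1 : Nat) : Int) - 1 = (m : Int) by push_cast; ring]
    rw [PySem.List.pyRange_neg_one_cons (by omega)]
    rw [show ((m : Nat) : Int) - 1 = ((m : Int)) - 1 from rfl]
    rw [show ((m + 1 : Nat) : Int) = (m : Int) + 1 by push_cast; ring]
    rw [PySem.List.pyRange_one_succ_right (by omega), List.foldl_append]
    have hclean' : ∀ j, ((m : Nat) : Int) + 1 ≤ j → j < line_idx → pvHdr lines j = none := by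
      intro j h1 h2
      exact hclean j (by push_cast; omega) h2
    set s := PySem.Str.strip ((PySem.List.pyGet? lines (m : Int)).getD "") with hs
    by_cases hd : PySem.Str.startswith s "def " = true
    · by_cases he : PySem.Str.endswith s ":" = true
      · -- def header at m
        simp only [pvAOuter, pvBStep, List.foldl, ← hs, hd, he, Bool.and_self, Bool.true_or,
          if_true, pvInterp]
        by_cases hci : ci > pvIndent ((PySem.List.pyGet? lines (m : Int)).getD "")
        · simp only [hci, if_true]
          rw [pvAInner_true]
          · simp
          · intro j hj
            rw [PySem.List.mem_pyRange_one] at hj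
            exact pvHdr_none_not_def lines j (hclean' j (by omega) (by omega))
        · simp at hci
          simp [hci]
      · -- not a header (no colon)
        have he' := he
        simp only [hs] at he'
        simp at he'
        have hm : pvHdr lines (m : Int) = none := by simp [pvHdr, he']
        simp only [pvAOuter, pvBStep, List.foldl, ← hs, hd, he, Bool.and_false]
        simpa using ih (by omega) (fun j h1 h2 => by
          rcases eq_or_lt_of_le h1 with h | h
          · exact h ▸ hm
          · exact hclean' j (by omega) h2)
    · by_cases hc : PySem.Str.startswith s "class " = true
      · by_cases he : PySem.Str.endswith s ":" = true
        · -- class header at m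
          simp only [pvAOuter, pvBStep, List.foldl, ← hs, hd, hc, he, pvInterp]
          simp
        · have he' := he
          simp only [hs] at he'
          simp at he'
          have hm : pvHdr lines (m : Int) = none := by simp [pvHdr, he']
          simp only [pvAOuter, pvBStep, List.foldl, ← hs, hd, hc, he]
          simp only [Bool.and_false]
          simpa using ih (by omega) (fun j h1 h2 => by
            rcases eq_or_lt_of_le h1 with h | h
            · exact h ▸ hm
            · exact hclean' j (by omega) h2)
      · have hd' := hd
        have hc' := hc
        simp only [hs] at hd' hc'
        simp at hd' hc'
        have hm : pvHdr lines (m : Int) = none := by simp [pvHdr, hd', hc']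
        simp only [pvAOuter, pvBStep, List.foldl, ← hs, hd, hc]
        simp only [Bool.false_and, Bool.or_self]
        simpa using ih (by omega) (fun j h1 h2 => by
          rcases eq_or_lt_of_le h1 with h | h
          · exact h ▸ hm
          · exact hclean' j (by omega) h2)

-- ===== VERDICT (by name: the statement is the Claim_ definition above) =====
theorem is_inside_function_py_spec : Claim_equal_is_inside_function_py := by
  intro lines line_idx _ _
  unfold Spec_is_inside_function_py is_inside_function_py is_inside_function_py_alt
  by_cases hpos : 0 < line_idx
  · have hmain := pvMain lines line_idx
      (pvIndent ((PySem.List.pyGet? lines line_idx).getD "")) line_idx.toNat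
      (by omega) (by intro j h1 h2; omega)
    rw [Int.toNat_of_nonneg (by omega)] at hmain
    simpa [pvInterp] using hmain
  · rw [PySem.List.pyRange_neg_one_eq_nil (by omega), PySem.List.pyRange_one_eq_nil (by omega)]
    rfl
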